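-- pv_equiv track=rewrite | github.com/yejiwon/algorithm | jiwon/기출문제 연습/오늘의집/3.py | getFormatValue
-- ===== SOURCE A (Python) =====
-- def getFormatValue(formats, targetKey, key):
--     value = formats[key] if key in formats else "{"+key+"}"
--     if value.startswith("{"):   # 밸류가 템플릿이면
--         nextKey = value[1:-1]
--         if nextKey == targetKey:    # 무한 반복이면
--             return "{"+targetKey+"}"
--         if nextKey in formats:      # 밸류가 재귀이면
--             return getFormatValue(formats, targetKey, nextKey)
--     return value
-- ===== SOURCE B (Python) =====
-- def getFormatValue(formats, targetKey, key):
--     # Staged: precompute the reference map once, follow it with a bounded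
--     # loop (a dying chain never revisits a key, so len(formats)+1 steps
--     # suffice), then classify the final value once.
--     ref = {}
--     for k, v in formats.items():
--         if v.startswith("{"):
--             ref[k] = v[1:-1]
--     for _ in range(len(formats) + 1):
--         nk = ref.get(key)
--         if nk is not None and nk != targetKey and nk in formats:
--             key = nk
--         else:
--             break
--     value = formats.get(key, "{" + key + "}")
--     if value.startswith("{") and value[1:-1] == targetKey:
--         return "{" + targetKey + "}"
--     return value
-- ===== Notes on version B (the rewrite author's own statement) =====
-- stated objective: alternative
-- what changed: Replaced A's unbounded tail recursion with a staged pipeline: precompute a key->referenced-key map from the template values once, follow that map in a bounded loop (a terminating chain never revisits a key, so len(formats)+1 steps suffice), and classify the final value in a single tail check; Pre_ additionally requires distinct keys in the association-list encoding, since formats models a Python dict, where duplicate keys cannot arise.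
import Mathlib
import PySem

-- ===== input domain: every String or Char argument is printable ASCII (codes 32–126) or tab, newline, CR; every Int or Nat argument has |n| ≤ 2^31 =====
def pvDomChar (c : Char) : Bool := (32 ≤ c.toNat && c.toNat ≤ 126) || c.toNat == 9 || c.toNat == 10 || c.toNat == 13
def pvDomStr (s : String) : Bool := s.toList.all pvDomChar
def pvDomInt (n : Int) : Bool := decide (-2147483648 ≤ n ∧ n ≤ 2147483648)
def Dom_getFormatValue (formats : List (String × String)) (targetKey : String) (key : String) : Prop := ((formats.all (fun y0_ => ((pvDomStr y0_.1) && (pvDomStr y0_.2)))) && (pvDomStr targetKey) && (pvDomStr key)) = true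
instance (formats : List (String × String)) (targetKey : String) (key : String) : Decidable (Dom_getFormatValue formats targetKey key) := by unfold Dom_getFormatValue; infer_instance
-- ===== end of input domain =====

-- B replaces A's unbounded tail recursion by a staged pipeline — precompute the key→referenced-key
-- map, follow it with a bounded loop, classify the final value once — so B terminates on reference
-- cycles where A's recursion raises; equal to A wherever A returns (Pre_).

-- ===== PORT A =====
-- `value = formats[key] if key in formats else "{"+key+"}"`
def fvValue (formats : List (String × String)) (key : String) : String :=
  match (PySem.Dict.mk formats).get? key with
  | some v => v
  | none => "{" ++ key ++ "}"

-- A's unbounded recursion, made total with fuel; when the Python recursion returns, its depth is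
-- at most len(formats)+1 (a returning chain never revisits a key), so the fuel is never exhausted
-- under Pre_getFormatValue.
def getFormatValueFuel (formats : List (String × String)) (targetKey : String) : Nat → String → String
  | 0, key => "{" ++ key ++ "}"  -- fuel exhaustion: unreachable under Pre_getFormatValue
  | fuel + 1, key =>
    let value := fvValue formats key
    if PySem.Str.startswith value "{" then
      let nextKey := PySem.Str.slice value (some 1) (some (-1))
      if nextKey == targetKey then "{" ++ targetKey ++ "}"
      else if (PySem.Dict.mk formats).contains nextKey then
        getFormatValueFuel formats targetKey fuel nextKey
      else value
    else value

def getFormatValue (formats : List (String × String)) (targetKey : String) (key : String) : String :=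
  getFormatValueFuel formats targetKey ((PySem.Dict.mk formats).size + 1) key

-- ===== PORT B =====
-- Source B stage 1: `ref = {k: v[1:-1] for template values v}` built by the loop over formats.items()
def bRefStep (d : PySem.Dict String String) (kv : String × String) : PySem.Dict String String :=
  if PySem.Str.startswith kv.2 "{" then
    d.insert kv.1 (PySem.Str.slice kv.2 (some 1) (some (-1)))
  else d

def bRef (formats : List (String × String)) : PySem.Dict String String :=
  (PySem.Dict.mk formats).items.foldl bRefStep PySem.Dict.empty

-- Source B stage 2: `for _ in range(len(formats)+1): … else break` following ref from key
def bWalk (formats : List (String × String)) (targetKey : String)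
    (ref : PySem.Dict String String) : Nat → String → String
  | 0, key => key
  | n + 1, key =>
    match ref.get? key with
    | some nk =>
      if nk != targetKey && (PySem.Dict.mk formats).contains nk then
        bWalk formats targetKey ref n nk
      else key
    | none => key

-- Source B stage 3: classify the value at the final key
def getFormatValue_alt (formats : List (String × String)) (targetKey : String) (key : String) : String :=
  let last := bWalk formats targetKey (bRef formats) ((PySem.Dict.mk formats).size + 1) key
  let value := (PySem.Dict.mk formats).getD last ("{" ++ last ++ "}")
  if PySem.Str.startswith value "{" &&
      (PySem.Str.slice value (some 1) (some (-1)) == targetKey) then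
    "{" ++ targetKey ++ "}"
  else value

-- ===== PRECONDITION & SPEC =====
-- The successor map of A's reference chain: `some nextKey` exactly when A's Python recurses from k.
def fvStep (formats : List (String × String)) (targetKey : String) (k : String) : Option String :=
  let value := fvValue formats k
  if PySem.Str.startswith value "{" then
    let nextKey := PySem.Str.slice value (some 1) (some (-1))
    if nextKey == targetKey then none
    else if (PySem.Dict.mk formats).contains nextKey then some nextKey
    else none
  else none

def fvChain (formats : List (String × String)) (targetKey : String) : Option String → Option String :=
  fun o => o.bind (fvStep formats targetKey)

-- Pre_ requires (a) distinct keys in the association-list encoding — formats models a Python dict,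
-- so a duplicate-key list represents no actual input — and (b) that A's reference chain from `key`
-- dies out (non-template value, missing key, or targetKey): exactly the inputs where A's recursion
-- returns instead of raising RecursionError (a returning chain never revisits a key, so it dies
-- within formats.length + 1 steps).
def Pre_getFormatValue (formats : List (String × String)) (targetKey : String) (key : String) : Prop :=
  (formats.map Prod.fst).Nodup ∧
  (fvChain formats targetKey)^[formats.length + 1] (some key) = none
instance (formats : List (String × String)) (targetKey : String) (key : String) : Decidable (Pre_getFormatValue formats targetKey key) := by unfold Pre_getFormatValue; infer_instance

def pvWitness_getFormatValue : (List (String × String)) × String × String :=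
  ([("a", "{b}"), ("b", "hello")], "t", "a")

def Spec_getFormatValue (formats : List (String × String)) (targetKey : String) (key : String) (out : String) : Prop := out = getFormatValue_alt formats targetKey key
instance (formats : List (String × String)) (targetKey : String) (key : String) (out : String) : Decidable (Spec_getFormatValue formats targetKey key out) := by unfold Spec_getFormatValue; infer_instance

-- ===== CLAIM (what is proved, stated in full; the proofs are below) =====
def Claim_equal_getFormatValue : Prop := ∀ (formats : List (String × String)) (targetKey : String) (key : String), Dom_getFormatValue formats targetKey key → Pre_getFormatValue formats targetKey key → Spec_getFormatValue formats targetKey key (getFormatValue formats targetKey key)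
-- ===== LEMMAS AND PROOFS =====

-- xs[1:-1] of "{" + key + "}" is key
theorem slice_brace (key : String) :
    PySem.Str.slice ("{" ++ key ++ "}") (some 1) (some (-1)) = key := by
  refine String.toList_inj.mp ?_
  have hl : ("{" ++ key ++ "}").toList = '{' :: key.toList ++ ['}'] := by simp
  simp only [PySem.Str.toList_slice, hl]
  simp [PySem.List.slice, PySem.List.clampIdx]
  rw [if_neg (by omega)]
  simp

-- Source B's `formats.get(key, "{"+key+"}")` computes A's `value`
theorem getD_fvValue (f : List (String × String)) (k : String) :
    (PySem.Dict.mk f).getD k ("{" ++ k ++ "}") = fvValue f k := by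
  rw [PySem.Dict.getD_eq_get?_getD, fvValue]
  cases (PySem.Dict.mk f).get? k <;> rfl

-- a fold of bRefStep over pairs whose keys avoid k leaves the binding of k alone
theorem foldl_bRefStep_get?_of_not_mem (k : String) :
    ∀ (l : List (String × String)) (d : PySem.Dict String String),
      k ∉ l.map Prod.fst → (l.foldl bRefStep d).get? k = d.get? k := by
  intro l
  induction l with
  | nil => intro d _; rfl
  | cons kv rest ih =>
    intro d hk
    simp only [List.map_cons, List.mem_cons, not_or] at hk
    rw [List.foldl_cons, ih _ hk.2]
    unfold bRefStep
    split
    · exact PySem.Dict.get?_insert_of_ne d _ hk.1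
    · rfl

-- what the ref-map fold binds k to: the reference of the FIRST pair with key k (keys are unique)
theorem foldl_bRefStep_get? (k : String) :
    ∀ (l : List (String × String)) (d : PySem.Dict String String),
      (l.map Prod.fst).Nodup →
      (l.foldl bRefStep d).get? k =
        match (PySem.Dict.mk l).get? k with
        | some v =>
          if PySem.Str.startswith v "{" then
            some (PySem.Str.slice v (some 1) (some (-1)))
          else d.get? k
        | none => d.get? k := by
  intro l
  induction l with
  | nil => intro d _; rfl
  | cons kv rest ih =>
    intro d hnd
    simp only [List.map_cons, List.nodup_cons] at hnd
    rw [List.foldl_cons, PySem.Dict.get?_mk_cons]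
    by_cases hk : kv.1 = k
    · subst hk
      simp only [BEq.rfl, if_pos]
      rw [foldl_bRefStep_get?_of_not_mem _ _ _ hnd.1]
      unfold bRefStep
      split
      · next h => simp [PySem.Dict.get?_insert_self]
      · next h => simp
    · have hbeq : (kv.1 == k) = false := by simp [hk]
      rw [hbeq, ih _ hnd.2]
      simp only [Bool.false_eq_true, if_false]
      have hd : (bRefStep d kv).get? k = d.get? k := by
        unfold bRefStep
        split
        · exact PySem.Dict.get?_insert_of_ne d _ (fun h => hk h.symm)
        · rfl
      cases hrest : (PySem.Dict.mk rest).get? k with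
      | none => exact hd
      | some v =>
        cases hsv : PySem.Str.startswith v "{" with
        | true => simp at hsv; simp [hsv]
        | false => simp at hsv; simp [hsv, hd]

-- the ref map built by Source B, characterised through A's `value`
theorem bRef_get? (f : List (String × String)) (hnd : (f.map Prod.fst).Nodup) (k : String) :
    (bRef f).get? k =
      match (PySem.Dict.mk f).get? k with
      | some v =>
        if PySem.Str.startswith v "{" then
          some (PySem.Str.slice v (some 1) (some (-1)))
        else none
      | none => none := by
  have h := foldl_bRefStep_get? k f PySem.Dict.empty hnd
  unfold bRef
  rw [show (PySem.Dict.mk f).items = f from rfl, h]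
  cases (PySem.Dict.mk f).get? k <;> simp

-- Source B's final classification of the value at the last key
def bFinish (formats : List (String × String)) (targetKey : String) (last : String) : String :=
  let value := (PySem.Dict.mk formats).getD last ("{" ++ last ++ "}")
  if PySem.Str.startswith value "{" &&
      (PySem.Str.slice value (some 1) (some (-1)) == targetKey) then
    "{" ++ targetKey ++ "}"
  else value

theorem alt_eq_bFinish (f : List (String × String)) (t k : String) :
    getFormatValue_alt f t k =
      bFinish f t (bWalk f t (bRef f) ((PySem.Dict.mk f).size + 1) k) := rfl

-- when A does not recurse from `key`, one unfolding of A is Source B's final classification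
theorem step_none_finish (f : List (String × String)) (t : String) (fa : Nat) (key : String)
    (h : fvStep f t key = none) :
    getFormatValueFuel f t (fa + 1) key = bFinish f t key := by
  have hv := getD_fvValue f key
  simp only [getFormatValueFuel, bFinish, hv]
  simp only [fvStep] at h
  cases hs : PySem.Str.startswith (fvValue f key) "{" with
  | false => simp [hs]
  | true =>
    simp only [hs, if_true] at h
    cases ht : (PySem.Str.slice (fvValue f key) (some 1) (some (-1)) == t) with
    | true => simp [hs, ht]
    | false =>
      simp only [ht, Bool.false_eq_true, if_false] at h
      cases hm : (PySem.Dict.mk f).contains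
          (PySem.Str.slice (fvValue f key) (some 1) (some (-1))) with
      | true => rw [hm] at h; simp at h
      | false => simp [hs, ht, hm]

-- when A recurses, the branch conditions it passed, spelled out
theorem step_some_parts (f : List (String × String)) (t : String) (key nk : String)
    (h : fvStep f t key = some nk) :
    PySem.Str.startswith (fvValue f key) "{" = true ∧
    nk = PySem.Str.slice (fvValue f key) (some 1) (some (-1)) ∧
    (nk == t) = false ∧ (PySem.Dict.mk f).contains nk = true := by
  simp only [fvStep] at h
  cases hs : PySem.Str.startswith (fvValue f key) "{" with
  | false => rw [hs] at h; simp at h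
  | true =>
    simp only [hs, if_true] at h
    cases ht : (PySem.Str.slice (fvValue f key) (some 1) (some (-1)) == t) with
    | true => simp [ht] at h
    | false =>
      simp only [ht, Bool.false_eq_true, if_false] at h
      cases hm : (PySem.Dict.mk f).contains
          (PySem.Str.slice (fvValue f key) (some 1) (some (-1))) with
      | false => rw [hm] at h; simp at h
      | true =>
        rw [hm] at h
        simp only [if_true, Option.some.injEq] at h
        subst h
        exact ⟨rfl, rfl, ht, hm⟩

-- when A does not recurse from `key`, Source B's walk stops there
theorem walk_stop (f : List (String × String)) (t : String)
    (hnd : (f.map Prod.fst).Nodup) (key : String) (m : Nat)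
    (h : fvStep f t key = none) :
    bWalk f t (bRef f) m key = key := by
  cases m with
  | zero => rfl
  | succ m' =>
    have href := bRef_get? f hnd key
    simp only [bWalk]
    cases hget : (PySem.Dict.mk f).get? key with
    | none => rw [hget] at href; simp only [] at href; rw [href]
    | some w =>
      rw [hget] at href
      have hv : fvValue f key = w := by simp [fvValue, hget]
      simp only [fvStep, hv] at h
      cases hs : PySem.Str.startswith w "{" with
      | false => simp only [hs, Bool.false_eq_true, if_false] at href; rw [href]
      | true =>
        simp only [hs, if_true] at href h
        rw [href]
        cases ht : (PySem.Str.slice w (some 1) (some (-1)) == t) with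
        | true => simp [bne, ht]
        | false =>
          simp only [ht, Bool.false_eq_true, if_false] at h
          cases hm : (PySem.Dict.mk f).contains (PySem.Str.slice w (some 1) (some (-1))) with
          | true => rw [hm] at h; simp at h
          | false => simp [bne, ht, hm]

-- when A recurses to nk, Source B's walk takes the same step
theorem walk_adv (f : List (String × String)) (t : String)
    (hnd : (f.map Prod.fst).Nodup) (key nk : String) (m : Nat)
    (h : fvStep f t key = some nk) :
    bWalk f t (bRef f) (m + 1) key = bWalk f t (bRef f) m nk := by
  obtain ⟨hs, hnkeq, ht, hm⟩ := step_some_parts f t key nk h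
  have href := bRef_get? f hnd key
  simp only [bWalk]
  cases hget : (PySem.Dict.mk f).get? key with
  | none =>
    have hv : fvValue f key = "{" ++ key ++ "}" := by simp [fvValue, hget]
    rw [hv, slice_brace] at hnkeq
    subst hnkeq
    have hc : (PySem.Dict.mk f).contains nk = ((PySem.Dict.mk f).get? nk).isSome :=
      PySem.Dict.contains_eq_isSome_get? _ _
    rw [hget, Option.isSome_none] at hc
    rw [hc] at hm
    exact absurd hm (by simp)
  | some w =>
    rw [hget] at href
    have hv : fvValue f key = w := by simp [fvValue, hget]
    rw [hv] at hs hnkeq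
    simp only [hs, if_true] at href
    rw [href, ← hnkeq]
    simp [bne, ht, hm]

-- the main induction: while A's chain dies in n steps, A's recursion equals B's walk + classify
theorem fv_main (f : List (String × String)) (t : String) (hnd : (f.map Prod.fst).Nodup) :
    ∀ (n : Nat) (key : String) (fa m : Nat),
      (fvChain f t)^[n] (some key) = none → n ≤ fa → n - 1 ≤ m →
      getFormatValueFuel f t fa key = bFinish f t (bWalk f t (bRef f) m key) := by
  intro n
  induction n with
  | zero => intro key fa m h _ _; simp at h
  | succ n ih =>
    intro key fa m hdie hfa hm
    obtain ⟨fa', rfl⟩ : ∃ x, fa = x + 1 := ⟨fa - 1, by omega⟩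
    cases hstep : fvStep f t key with
    | none =>
      rw [walk_stop f t hnd key m hstep]
      exact step_none_finish f t fa' key hstep
    | some nk =>
      have hchain : fvChain f t (some key) = some nk := by
        rw [show fvChain f t (some key) = fvStep f t key from rfl, hstep]
      have h1 : (fvChain f t)^[n] (some nk) = none := by
        rw [Function.iterate_succ_apply, hchain] at hdie
        exact hdie
      have hn : 1 ≤ n := by
        rcases Nat.eq_zero_or_pos n with h0 | h0
        · subst h0; simp at h1
        · exact h0
      obtain ⟨m', rfl⟩ : ∃ x, m = x + 1 := ⟨m - 1, by omega⟩
      rw [walk_adv f t hnd key nk m' hstep]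
      obtain ⟨hs, hnkeq, ht, hmc⟩ := step_some_parts f t key nk hstep
      simp only [getFormatValueFuel]
      rw [← hnkeq]
      simp only [hs, if_true, ht, Bool.false_eq_true, if_false, hmc]
      exact ih nk fa' m' h1 (by omega) (by omega)

-- ===== VERDICT (by name: the statement is the Claim_ definition above) =====
theorem getFormatValue_spec : Claim_equal_getFormatValue := by
  intro f t k _ hpre
  unfold Spec_getFormatValue getFormatValue
  rw [alt_eq_bFinish, show (PySem.Dict.mk f).size = f.length from rfl]
  exact fv_main f t hpre.1 (f.length + 1) k (f.length + 1) (f.length + 1)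
    hpre.2 le_rfl (by omega)
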